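-- pv_equiv track=rewrite | github.com/hah-ak/algorithm-study | programmers/removeTwice.py | solution
-- ===== SOURCE A (Python) =====
-- def solution(s):
--     if s != "":
--         for i in range(1,len(s)):
--             if s[i] == s[i-1]:
--                 return solution(s[:i-1]+s[i+1:])
--         return 0
--     else:
--         return 1
-- ===== SOURCE B (Python) =====
-- def solution(s):
--     stack = []
--     for c in s:
--         if stack and stack[-1] == c:
--             stack.pop()
--         else:
--             stack.append(c)
--     return 1 if not stack else 0
-- ===== Notes on version B (the rewrite author's own statement) =====
-- stated objective: faster
-- what changed: Replaced the recursive rescan-and-reslice deletion of the first adjacent equal pair with a single-pass stack that cancels adjacent duplicates.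
import Mathlib
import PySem

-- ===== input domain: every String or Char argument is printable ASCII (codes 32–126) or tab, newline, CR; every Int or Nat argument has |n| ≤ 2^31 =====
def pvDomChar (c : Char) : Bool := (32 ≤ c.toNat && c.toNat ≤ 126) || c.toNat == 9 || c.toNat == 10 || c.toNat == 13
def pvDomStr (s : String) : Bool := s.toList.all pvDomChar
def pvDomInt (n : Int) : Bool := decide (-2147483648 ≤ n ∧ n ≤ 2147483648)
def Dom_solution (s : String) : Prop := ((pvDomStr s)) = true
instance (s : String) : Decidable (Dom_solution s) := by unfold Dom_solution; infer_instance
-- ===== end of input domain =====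

-- B replaces A's recursive rescan-and-reslice pair deletion by a one-pass stack (faster).


-- ===== PORT A =====
-- A's body and its for-loop, fused into one recursion over the char list:
-- i is the loop index of `for i in range(1, len(s))`; a recursive call of the
-- Python restarts the scan at i = 1 on the sliced string s[:i-1] + s[i+1:].
def solList (l : List Char) (i : Nat) : Int :=
  if l = [] then 1
  else if h : i < l.length then
    if l[i]'h = l[i-1]'(Nat.lt_of_le_of_lt (Nat.sub_le i 1) h) then
      solList (l.take (i-1) ++ l.drop (i+1)) 1
    else
      solList l (i+1)
  else 0
termination_by (l.length, l.length - i)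
decreasing_by
  · apply Prod.Lex.left
    simp [List.length_append, List.length_take, List.length_drop]
    omega
  · apply Prod.Lex.right
    omega

def solution (s : String) : Int := solList s.toList 1

-- ===== PORT B =====
-- one step of Source B's loop body: pop on a match with the top, else push (top = head)
def pvStep (st : List Char) (c : Char) : List Char :=
  match st with
  | [] => [c]
  | t :: ts => if t = c then ts else c :: t :: ts

def solution_alt (s : String) : Int :=
  if s.toList.foldl pvStep [] = [] then 1 else 0

-- ===== PRECONDITION & SPEC =====
def Spec_solution (s : String) (out : Int) : Prop := out = solution_alt s
instance (s : String) (out : Int) : Decidable (Spec_solution s out) := by unfold Spec_solution; infer_instance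

-- ===== CLAIM (what is proved, stated in full; the proofs are below) =====
def Claim_equal_solution : Prop := ∀ (s : String), Dom_solution s → Spec_solution s (solution s)

-- ===== LEMMAS AND PROOFS =====

-- the stack never holds two equal adjacent chars
theorem pvStep_chain (st : List Char) (c : Char) (h : st.IsChain Ne) :
    (pvStep st c).IsChain Ne := by
  cases st with
  | nil => simp [pvStep]
  | cons t ts =>
    simp only [pvStep]
    split_ifs with hc
    · exact (List.isChain_cons.mp h).2
    · rw [List.isChain_cons]
      refine ⟨?_, h⟩
      intro y hy
      simp at hy
      subst hy
      exact fun e => hc e.symm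

theorem pvRun_chain (l : List Char) (st : List Char) (h : st.IsChain Ne) :
    (List.foldl pvStep st l).IsChain Ne := by
  induction l generalizing st with
  | nil => exact h
  | cons c rest ih => exact ih _ (pvStep_chain st c h)

-- feeding the same char twice into a reduced stack is the identity
theorem pvStep_pair (st : List Char) (c : Char) (h : st.IsChain Ne) :
    pvStep (pvStep st c) c = st := by
  cases st with
  | nil => simp [pvStep]
  | cons t ts =>
    by_cases hc : t = c
    · subst hc
      cases ts with
      | nil => simp [pvStep]
      | cons u us =>
        have htu : t ≠ u := (List.isChain_cons.mp h).1 u (by simp)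
        simp [pvStep, Ne.symm htu]
    · simp [pvStep, hc]

-- if no adjacent chars of l are equal and l's head differs from the stack top,
-- the fold just pushes everything
theorem pvRun_noadj (l : List Char) (st : List Char) (h : l.IsChain Ne)
    (hhd : ∀ c c', l.head? = some c → st.head? = some c' → c' ≠ c) :
    List.foldl pvStep st l = l.reverse ++ st := by
  induction l generalizing st with
  | nil => simp
  | cons a rest ih =>
    have hstep : pvStep st a = a :: st := by
      cases st with
      | nil => rfl
      | cons t ts =>
        have : t ≠ a := hhd a t rfl rfl
        simp [pvStep, this]
    rw [List.foldl_cons, hstep,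
      ih (a :: st) (List.isChain_cons.mp h).2 (by
        intro c c' hc hc'
        cases rest with
        | nil => simp at hc
        | cons b bs =>
          simp at hc hc'
          subst hc; subst hc'
          exact (List.isChain_cons.mp h).1 b (by simp))]
    simp

theorem pvList_decomp (l : List Char) (i : Nat) (h1 : 1 ≤ i) (h : i < l.length) :
    l = l.take (i-1) ++ (l[i-1]'(by omega)) :: (l[i]'h) :: l.drop (i+1) := by
  have hi1 : i - 1 + 1 = i := by omega
  have hd1 : l.drop (i-1) = (l[i-1]'(by omega)) :: l.drop i := by
    rw [List.drop_eq_getElem_cons (by omega : i - 1 < l.length), hi1]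
  have hd2 : l.drop i = (l[i]'h) :: l.drop (i+1) :=
    List.drop_eq_getElem_cons h
  conv_lhs => rw [← List.take_append_drop (i-1) l]
  rw [hd1, hd2]

theorem solList_eq (l : List Char) (i : Nat) (h1 : 1 ≤ i)
    (h2 : ∀ j, 1 ≤ j → j < i → ∀ (hj : j < l.length),
        l[j]'hj ≠ l[j-1]'(Nat.lt_of_le_of_lt (Nat.sub_le j 1) hj)) :
    solList l i = (if List.foldl pvStep [] l = [] then 1 else 0) := by
  induction l, i using solList.induct with
  | case1 i =>
    simp [solList]
  | case2 l i hnil h heq ih =>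
    rw [solList]
    simp only [if_neg hnil, dif_pos h, if_pos heq]
    rw [ih le_rfl (by intro j hj1 hj2; omega)]
    have h1' : 1 ≤ i := h1
    set c := l[i-1]'(Nat.lt_of_le_of_lt (Nat.sub_le i 1) h) with hc
    have hdec := pvList_decomp l i h1' h
    have hstack :
        List.foldl pvStep [] l = List.foldl pvStep [] (l.take (i-1) ++ l.drop (i+1)) := by
      conv_lhs => rw [hdec]
      rw [List.foldl_append, List.foldl_append]
      rw [heq, ← hc]
      show List.foldl pvStep (pvStep (pvStep _ c) c) _ = _
      rw [pvStep_pair _ c (pvRun_chain _ [] (by simp))]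
    rw [hstack]
  | case3 l i hnil h heq ih =>
    rw [solList]
    simp only [if_neg hnil, dif_pos h, if_neg heq]
    apply ih (by omega)
    intro j hj1 hj2 hj
    by_cases hji : j = i
    · subst hji; exact heq
    · exact h2 j hj1 (by omega) hj
  | case4 l i hnil h =>
    rw [solList]
    simp only [if_neg hnil, dif_neg h]
    have hch : l.IsChain Ne := by
      rw [List.isChain_iff_getElem]
      intro k hk
      have := h2 (k+1) (by omega) (by omega) (by omega)
      simp only [Nat.add_sub_cancel] at this
      exact fun e => this e.symm
    have hrun : List.foldl pvStep [] l = l.reverse := by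
      rw [pvRun_noadj l [] hch (by intro c c' _ hc'; simp at hc'), List.append_nil]
    rw [hrun]
    have hne : l.reverse ≠ [] := by simpa using hnil
    simp [hne]

-- ===== VERDICT (by name: the statement is the Claim_ definition above) =====
theorem solution_spec : Claim_equal_solution := by
  intro s _
  show solution s = solution_alt s
  unfold solution solution_alt
  exact solList_eq s.toList 1 le_rfl (by intro j hj1 hj2; omega)
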